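-- pv_equiv track=rewrite | github.com/evenwebb/youtube-channel-link-scraper | scrape_links.py | _iter_redirect_urls
-- ===== SOURCE A (Python) =====
-- from typing import Callable, Iterable, List, Optional
--
-- REDIRECT_PREFIX = "https://www.youtube.com/redirect"
--
-- def _iter_redirect_urls(page_text: str) -> Iterable[str]:
--     start = 0
--     while True:
--         idx = page_text.find(REDIRECT_PREFIX, start)
--         if idx == -1:
--             break
--         end = idx
--         while end < len(page_text) and not page_text[end].isspace() and page_text[end] != ')':
--             end += 1
--         yield page_text[idx:end]
--         start = end
-- ===== SOURCE B (Python) =====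
-- import re
--
-- REDIRECT_PREFIX = "https://www.youtube.com/redirect"
--
-- _PATTERN = re.compile(re.escape(REDIRECT_PREFIX) + r"[^\s)]*")
--
-- def _iter_redirect_urls(page_text: str):
--     for match in _PATTERN.finditer(page_text):
--         yield match.group()
-- ===== Notes on version B (the rewrite author's own statement) =====
-- stated objective: idiomatic
-- what changed: Replaces the manual find/advance-end-pointer loop with one compiled regex (escaped prefix followed by a greedy class of non-whitespace, non-')' characters) iterated via re.finditer, yielding each match.
import Mathlib
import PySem

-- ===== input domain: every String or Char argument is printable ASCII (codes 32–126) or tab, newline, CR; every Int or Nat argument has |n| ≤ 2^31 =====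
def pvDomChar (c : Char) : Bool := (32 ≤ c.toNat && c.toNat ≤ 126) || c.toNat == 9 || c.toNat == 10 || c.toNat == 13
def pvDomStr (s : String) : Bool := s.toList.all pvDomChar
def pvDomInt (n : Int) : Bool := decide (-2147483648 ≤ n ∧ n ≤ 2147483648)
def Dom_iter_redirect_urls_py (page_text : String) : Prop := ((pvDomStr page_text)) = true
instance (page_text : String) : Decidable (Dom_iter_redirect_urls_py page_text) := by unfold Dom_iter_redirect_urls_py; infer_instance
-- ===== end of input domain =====

-- B replaces A's manual find/advance-end-pointer scan with a single compiled regex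
-- (escaped prefix + greedy [^\s)]* class) iterated by re.finditer; same results, same asymptotic cost.

-- REDIRECT_PREFIX = "https://www.youtube.com/redirect"
def pvRedirectPrefix : List Char := "https://www.youtube.com/redirect".toList

-- ===== PORT A =====
-- inner while: `while end < len(page_text) and not page_text[end].isspace() and page_text[end] != ')': end += 1`
def aAdvanceEnd (s : List Char) (e : Nat) : Nat :=
  if h : e < s.length then
    if !(PySem.Chars.isspace s[e]) && s[e] != ')' then aAdvanceEnd s (e + 1) else e
  else e
termination_by s.length - e

-- outer while: find the prefix from `start`; if absent stop; else scan `end`, yield the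
-- slice page_text[idx:end], continue at `end`.  The dependent guard is a totality guard
-- only: it always holds when the prefix was found (proved in aLoop_eq_bScan below);
-- Python's loop relies on the same fact to make progress.
def aLoop (s : List Char) (start : Nat) : List String :=
  if (PySem.Chars.findFrom s pvRedirectPrefix (start : Int) none) = -1 then []
  else
    if _h : start < aAdvanceEnd s (PySem.Chars.findFrom s pvRedirectPrefix (start : Int) none).toNat
         ∧ aAdvanceEnd s (PySem.Chars.findFrom s pvRedirectPrefix (start : Int) none).toNat ≤ s.length then
      String.ofList (PySem.List.slice s
          (some ((PySem.Chars.findFrom s pvRedirectPrefix (start : Int) none).toNat : Int))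
          (some ((aAdvanceEnd s (PySem.Chars.findFrom s pvRedirectPrefix (start : Int) none).toNat : Int))))
        :: aLoop s (aAdvanceEnd s (PySem.Chars.findFrom s pvRedirectPrefix (start : Int) none).toNat)
    else
      [String.ofList (PySem.List.slice s
          (some ((PySem.Chars.findFrom s pvRedirectPrefix (start : Int) none).toNat : Int))
          (some ((aAdvanceEnd s (PySem.Chars.findFrom s pvRedirectPrefix (start : Int) none).toNat : Int))))]
termination_by s.length - start
decreasing_by omega

def iter_redirect_urls_py (page_text : String) : List String :=
  aLoop page_text.toList 0

-- ===== PORT B =====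
-- the regex character class [^\s)] (exact on the ASCII input domain)
def bPred (c : Char) : Bool := !(PySem.Chars.isspace c) && c != ')'

-- regex engine scan: try the pattern at each position left to right; on a match, the match
-- is the escaped prefix followed by the greedy class run; resume scanning after the match.
def bScan (s : List Char) : List String :=
  match s with
  | [] => []
  | c :: rest =>
    if pvRedirectPrefix.isPrefixOf (c :: rest) then
      String.ofList (pvRedirectPrefix ++ ((c :: rest).drop pvRedirectPrefix.length).takeWhile bPred)
        :: bScan (((c :: rest).drop pvRedirectPrefix.length).drop
            (((c :: rest).drop pvRedirectPrefix.length).takeWhile bPred).length)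
    else bScan rest
termination_by s.length
decreasing_by
  · simp only [List.length_drop, List.length_cons]
    have : pvRedirectPrefix.length = 32 := by decide
    omega
  · simp

def iter_redirect_urls_py_alt (page_text : String) : List String :=
  bScan page_text.toList

-- ===== PRECONDITION & SPEC =====
def Spec_iter_redirect_urls_py (page_text : String) (out : List String) : Prop := out = iter_redirect_urls_py_alt page_text
instance (page_text : String) (out : List String) : Decidable (Spec_iter_redirect_urls_py page_text out) := by unfold Spec_iter_redirect_urls_py; infer_instance

-- ===== CLAIM (what is proved, stated in full; the proofs are below) =====
def Claim_equal_iter_redirect_urls_py : Prop := ∀ (page_text : String), Dom_iter_redirect_urls_py page_text → Spec_iter_redirect_urls_py page_text (iter_redirect_urls_py page_text)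

-- ===== LEMMAS AND PROOFS =====

theorem pvPrefix_all : pvRedirectPrefix.all bPred = true := by decide

theorem pvPrefix_pred : ∀ c ∈ pvRedirectPrefix, bPred c = true := by
  simpa [List.all_eq_true] using pvPrefix_all

theorem pvPrefix_len : pvRedirectPrefix.length = 32 := by decide

-- A's inner while advances exactly over the maximal bPred-run of the suffix
theorem aAdvanceEnd_eq (s : List Char) (e : Nat) :
    aAdvanceEnd s e = e + ((s.drop e).takeWhile bPred).length := by
  rw [aAdvanceEnd]
  by_cases h : e < s.length
  · rw [dif_pos h, List.drop_eq_getElem_cons h, List.takeWhile_cons,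
        show (!(PySem.Chars.isspace s[e]) && s[e] != ')') = bPred s[e] from rfl]
    by_cases hp : bPred s[e] = true
    · rw [if_pos hp, if_pos hp, aAdvanceEnd_eq s (e + 1)]
      simp only [List.length_cons]
      omega
    · rw [if_neg hp, if_neg hp]
      simp
  · rw [dif_neg h, List.drop_eq_nil_of_le (Nat.le_of_not_lt h)]
    simp
termination_by s.length - e

-- if the prefix occurs nowhere in t, the regex scan matches nothing
theorem bScan_nil_of_not_infix (t : List Char) (h : ¬ pvRedirectPrefix <:+: t) :
    bScan t = [] := by
  induction t with
  | nil => simp [bScan]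
  | cons c rest ih =>
    rw [bScan]
    have hnp : pvRedirectPrefix.isPrefixOf (c :: rest) = false := by
      by_contra hb
      simp only [Bool.not_eq_false, List.isPrefixOf_iff_prefix] at hb
      exact h hb.isInfix
    rw [hnp]
    simp only [Bool.false_eq_true, if_false]
    exact ih (fun hi => h (hi.trans (List.suffix_cons c rest).isInfix))

-- the regex scan skips positions where the pattern cannot match
theorem bScan_skip (s : List Char) (k j : Nat) (hkj : k ≤ j) (hj : j ≤ s.length)
    (hmin : ∀ i, k ≤ i → i < j → ¬ pvRedirectPrefix <+: s.drop i) :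
    bScan (s.drop k) = bScan (s.drop j) := by
  by_cases hlt : k < j
  · have hk : k < s.length := lt_of_lt_of_le hlt hj
    rw [List.drop_eq_getElem_cons hk, bScan]
    have hnp : pvRedirectPrefix.isPrefixOf (s[k] :: s.drop (k + 1)) = false := by
      by_contra hb
      simp only [Bool.not_eq_false, List.isPrefixOf_iff_prefix] at hb
      rw [← List.drop_eq_getElem_cons hk] at hb
      exact hmin k le_rfl hlt hb
    rw [hnp]
    simp only [Bool.false_eq_true, if_false]
    exact bScan_skip s (k + 1) j hlt hj (fun i hi hij => hmin i (Nat.le_of_succ_le hi) hij)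
  · rw [le_antisymm hkj (Nat.le_of_not_lt hlt)]
termination_by j - k

-- main loop equivalence, by induction on the remaining length
theorem aLoop_eq_bScan (n : Nat) (s : List Char) (start : Nat)
    (hn : s.length - start ≤ n) (hs : start ≤ s.length) :
    aLoop s start = bScan (s.drop start) := by
  induction n generalizing start with
  | zero =>
    rw [aLoop]
    by_cases hidx : PySem.Chars.findFrom s pvRedirectPrefix (start : Int) none = -1
    · rw [if_pos hidx]
      exact (bScan_nil_of_not_infix _
        ((PySem.Chars.findFrom_natCast_eq_neg_one_iff s pvRedirectPrefix start hs).mp hidx)).symm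
    · exfalso
      obtain ⟨h1, h2, _⟩ := PySem.Chars.findFrom_natCast_spec s pvRedirectPrefix start hs hidx
      have hlen := h2.length_le
      rw [List.length_drop, pvPrefix_len] at hlen
      omega
  | succ m ih =>
    rw [aLoop]
    by_cases hidx : PySem.Chars.findFrom s pvRedirectPrefix (start : Int) none = -1
    · rw [if_pos hidx]
      exact (bScan_nil_of_not_infix _
        ((PySem.Chars.findFrom_natCast_eq_neg_one_iff s pvRedirectPrefix start hs).mp hidx)).symm
    · rw [if_neg hidx]
      obtain ⟨h1, h2, h3⟩ := PySem.Chars.findFrom_natCast_spec s pvRedirectPrefix start hs hidx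
      set idx := PySem.Chars.findFrom s pvRedirectPrefix (start : Int) none with hidxdef
      set j := idx.toNat with hjdef
      have hstj : start ≤ j := by omega
      have hfit : j + 32 ≤ s.length := by
        have hlen := h2.length_le
        rw [List.length_drop, pvPrefix_len] at hlen
        omega
      obtain ⟨t, ht⟩ := h2
      have htail : t = s.drop (j + 32) := by
        have h32 := List.drop_left (l₁ := pvRedirectPrefix) (l₂ := t)
        rw [ht, pvPrefix_len, List.drop_drop] at h32
        simpa [Nat.add_comm] using h32.symm
      have hTW : (s.drop j).takeWhile bPred = pvRedirectPrefix ++ t.takeWhile bPred := by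
        rw [← ht, List.takeWhile_append_of_pos pvPrefix_pred]
      have hend : aAdvanceEnd s j = j + 32 + (t.takeWhile bPred).length := by
        rw [aAdvanceEnd_eq, hTW, List.length_append, pvPrefix_len]
        omega
      have hbodylen : (t.takeWhile bPred).length ≤ s.length - (j + 32) := by
        have hle := (List.takeWhile_prefix (p := bPred) (l := t)).length_le
        have hlt : t.length = s.length - (j + 32) := by rw [htail, List.length_drop]
        omega
      have hguard : start < aAdvanceEnd s j ∧ aAdvanceEnd s j ≤ s.length := by
        constructor
        · omega
        · rw [hend]; omega
      rw [dif_pos hguard]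
      -- B side: skip to position j, where the pattern matches
      rw [bScan_skip s start j hstj (by omega) h3]
      have hjlt : j < s.length := by omega
      rw [List.drop_eq_getElem_cons hjlt, bScan]
      have hpp : pvRedirectPrefix.isPrefixOf (s[j] :: s.drop (j + 1)) = true := by
        rw [List.isPrefixOf_iff_prefix, ← List.drop_eq_getElem_cons hjlt]
        exact ⟨t, ht⟩
      rw [hpp]
      simp only [if_true]
      have hdrop32 : (s[j] :: s.drop (j + 1)).drop pvRedirectPrefix.length = t := by
        rw [← List.drop_eq_getElem_cons hjlt, pvPrefix_len, List.drop_drop, ← htail]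
      rw [hdrop32]
      -- the yielded piece is the same string
      have hslice : PySem.List.slice s (some ((j : Nat) : Int)) (some ((aAdvanceEnd s j : Nat) : Int))
          = pvRedirectPrefix ++ t.takeWhile bPred := by
        rw [PySem.List.slice_natCast, hend,
            show j + 32 + (t.takeWhile bPred).length - j
               = (pvRedirectPrefix ++ t.takeWhile bPred).length by
              rw [List.length_append, pvPrefix_len]; omega]
        exact (List.prefix_iff_eq_take.mp (hTW ▸ List.takeWhile_prefix bPred)).symm
      rw [hslice]
      -- the continuations agree
      have hrec : aLoop s (aAdvanceEnd s j) = bScan (s.drop (aAdvanceEnd s j)) :=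
        ih (aAdvanceEnd s j) (by omega) hguard.2
      rw [hrec, hend, htail, List.drop_drop]

-- ===== VERDICT (by name: the statement is the Claim_ definition above) =====
theorem iter_redirect_urls_py_spec : Claim_equal_iter_redirect_urls_py := by
  intro page_text _
  unfold Spec_iter_redirect_urls_py iter_redirect_urls_py iter_redirect_urls_py_alt
  rw [aLoop_eq_bScan page_text.toList.length page_text.toList 0 (by omega) (by omega)]
  simp
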